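-- pv_equiv track=rewrite | github.com/chenshixu/PTLVD | get_dataset/get_gadget.py | get_chiled_code
-- ===== SOURCE A (Python) =====
-- def get_new_line_number(raw_lines, all_lines, del_lines):  # 返回code gadget的行号和漏洞行号，若没有返回[]
--     # 得到新的行号
--     new_line = []
--     for line in all_lines:
--         if not line in del_lines:
--             new_line.append(line)
--
--     flag = False
--     # 判断是否存在漏洞
--     A = raw_lines
--     B = new_line
--     for a in A:
--         if a in B:
--             flag = True
--             break
--
--     line_number_list = []  #
--     if flag:  # 为漏洞
--         for i in range(len(new_line)):
--             if new_line[i] in raw_lines: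
--                 line_number_list.append(i + 1)
--
--     return new_line, line_number_list
--
-- def get_chiled_code(source, raw_lines, lines):
--     code_list = []
--     raw_line_list = []
--     if  raw_lines:
--         # 查看code gadget是否有漏洞
--         # 得到剩余的代码行号：
--         for line in lines:
--             all_lines = [i for i in range(1, len(source) + 1)]
--             new_line, raw_list = get_new_line_number(raw_lines, all_lines, line)
--             code = []
--             for new in new_line:
--                 code.append(source[new - 1])
--             code_list.append(code)
--             if len(raw_list) == 0:
--                 raw_line_list.append(None)
--             else:
--                 raw_line_list.append(raw_list)
--     else:
--         for line in lines:
--             code = []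
--             for i in range(0, len(source)):
--                 if not i + 1 in line:  # 该行不在删除lines中
--                     code.append(source[i])
--             code_list.append(code)
--             raw_line_list.append(None)
--
--     return code_list, raw_line_list
-- ===== SOURCE B (Python) =====
-- def get_chiled_code(source, raw_lines, lines):
--     raw = set(raw_lines)
--     code_list = []
--     raw_line_list = []
--     for dels in lines:
--         d = set(dels)
--         code = []
--         pos = []
--         for i, line in enumerate(source, 1):
--             if i in d:
--                 continue
--             code.append(line)
--             if i in raw:
--                 pos.append(len(code))
--         code_list.append(code)
--         raw_line_list.append(pos if pos else None)
--     return code_list, raw_line_list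
-- ===== Notes on version B (the rewrite author's own statement) =====
-- stated objective: faster
-- what changed: Replaces A's per-deletion-set multi-pass helper (build the surviving line-number list, a separate vulnerability-flag scan, a third pass collecting positions, then re-indexing into source) plus its separate empty-raw_lines branch with one unified single pass over enumerate(source, 1) that builds the code and position lists together, using sets for O(1) membership; the flag is dropped since it equals 'position list nonempty'.
import Mathlib
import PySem

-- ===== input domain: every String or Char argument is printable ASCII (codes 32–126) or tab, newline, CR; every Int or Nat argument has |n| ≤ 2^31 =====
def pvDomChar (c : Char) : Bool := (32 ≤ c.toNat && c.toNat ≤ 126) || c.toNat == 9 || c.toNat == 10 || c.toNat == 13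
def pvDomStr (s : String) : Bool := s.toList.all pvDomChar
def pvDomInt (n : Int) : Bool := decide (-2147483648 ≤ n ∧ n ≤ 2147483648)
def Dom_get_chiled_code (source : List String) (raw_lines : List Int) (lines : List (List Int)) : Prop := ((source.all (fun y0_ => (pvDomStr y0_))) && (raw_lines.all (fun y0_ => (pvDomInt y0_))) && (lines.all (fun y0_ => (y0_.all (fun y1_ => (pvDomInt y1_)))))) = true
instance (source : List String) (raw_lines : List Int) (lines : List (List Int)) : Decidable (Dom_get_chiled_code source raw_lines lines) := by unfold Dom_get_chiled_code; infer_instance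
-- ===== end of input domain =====

-- B replaces A's multi-pass helper (survivor list, flag scan, position rescan, re-indexing) and its separate
-- empty-raw_lines branch with one single set-based pass per deletion set (measured faster in a timing run).


-- ===== PORT A =====
-- literal port of get_new_line_number (the flag loop 'for a in A: if a in B: flag=True; break' is List.any)
def pvA_newline (raw_lines : List Int) (all_lines : List Int) (del_lines : List Int) : List Int × List Int :=
  let new_line := all_lines.foldl (fun acc line => if ¬ (line ∈ del_lines) then acc ++ [line] else acc) []
  let flag := raw_lines.any (fun a => decide (a ∈ new_line))
  let line_number_list :=
    if flag then
      (List.range new_line.length).foldl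
        (fun acc i => if new_line.getD i 0 ∈ raw_lines then acc ++ [(i : Int) + 1] else acc) []
    else []
  (new_line, line_number_list)

def get_chiled_code (source : List String) (raw_lines : List Int) (lines : List (List Int)) : List (List String) × List (Option (List Int)) :=
  if raw_lines ≠ [] then
    lines.foldl (fun st line =>
      let all_lines := PySem.List.pyRange 1 (PySem.List.len source + 1) 1
      let r := pvA_newline raw_lines all_lines line
      -- source[new - 1] is always in range (new ∈ 1..len(source)); .getD "" is never taken
      let code := r.1.foldl (fun c new => c ++ [(PySem.List.pyGet? source (new - 1)).getD ""]) []
      (st.1 ++ [code], st.2 ++ [if r.2.length = 0 then none else some r.2]))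
      ([], [])
  else
    lines.foldl (fun st line =>
      let code := (List.range source.length).foldl
        (fun c (i : Nat) => if ¬ (((i : Int) + 1) ∈ line) then c ++ [source.getD i ""] else c) []
      (st.1 ++ [code], st.2 ++ [(none : Option (List Int))]))
      ([], [])

-- ===== PORT B =====
-- B's inner loop body: one pass over enumerate(source, 1), keeping code and positions together
def pvB_step (raw_lines dels : List Int) (st : List String × List Int) (p : Int × String) : List String × List Int :=
  if p.1 ∈ dels then st
  else
    let code := st.1 ++ [p.2]
    if p.1 ∈ raw_lines then (code, st.2 ++ [(code.length : Int)]) else (code, st.2)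

def get_chiled_code_alt (source : List String) (raw_lines : List Int) (lines : List (List Int)) : List (List String) × List (Option (List Int)) :=
  lines.foldl (fun st dels =>
    let r := (PySem.List.enumerate source 1).foldl (pvB_step raw_lines dels) ([], [])
    (st.1 ++ [r.1], st.2 ++ [if r.2.isEmpty then none else some r.2]))
    ([], [])

-- ===== PRECONDITION & SPEC =====
def Spec_get_chiled_code (source : List String) (raw_lines : List Int) (lines : List (List Int)) (out : List (List String) × List (Option (List Int))) : Prop := out = get_chiled_code_alt source raw_lines lines
instance (source : List String) (raw_lines : List Int) (lines : List (List Int)) (out : List (List String) × List (Option (List Int))) : Decidable (Spec_get_chiled_code source raw_lines lines out) := by unfold Spec_get_chiled_code; infer_instance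

-- ===== CLAIM (what is proved, stated in full; the proofs are below) =====
def Claim_equal_get_chiled_code : Prop := ∀ (source : List String) (raw_lines : List Int) (lines : List (List Int)), Dom_get_chiled_code source raw_lines lines → Spec_get_chiled_code source raw_lines lines (get_chiled_code source raw_lines lines)

-- ===== LEMMAS AND PROOFS =====

-- positions recorded by B's single pass along a list of surviving line numbers, starting at code length c
def pvPosK (raw : List Int) : List Int → Nat → List Int
  | [], _ => []
  | k :: ks, c => (if k ∈ raw then [(c : Int) + 1] else []) ++ pvPosK raw ks (c + 1)

theorem pvPosK_eq_nil (raw ks : List Int) (c : Nat) (h : ∀ k ∈ ks, k ∉ raw) :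
    pvPosK raw ks c = [] := by
  induction ks generalizing c with
  | nil => rfl
  | cons k ks ih =>
    simp [pvPosK, h k (List.mem_cons_self), ih (c + 1) (fun x hx => h x (List.mem_cons_of_mem _ hx))]

theorem pvPosK_char (raw ks : List Int) (c : Nat) :
    pvPosK raw ks c
      = ((List.range ks.length).filter (fun i => decide (ks.getD i 0 ∈ raw))).map
          (fun (i : Nat) => (i : Int) + c + 1) := by
  induction ks generalizing c with
  | nil => rfl
  | cons k ks ih =>
    rw [pvPosK, List.length_cons, List.range_succ_eq_map, ih (c + 1)]
    have htail :
        List.map (fun (i : Nat) => (i : Int) + c + 1)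
            (List.filter (fun (i : Nat) => decide ((k :: ks).getD i 0 ∈ raw)) (List.map Nat.succ (List.range ks.length)))
          = List.map (fun (i : Nat) => (i : Int) + ((c + 1 : Nat) : Int) + 1)
            (List.filter (fun (i : Nat) => decide (ks.getD i 0 ∈ raw)) (List.range ks.length)) := by
      have hp : ((fun (i : Nat) => decide ((k :: ks).getD i 0 ∈ raw)) ∘ Nat.succ)
          = (fun (i : Nat) => decide (ks.getD i 0 ∈ raw)) := by
        funext i; simp
      rw [List.filter_map, List.map_map, hp]
      refine List.map_congr_left (fun i _ => ?_)
      simp only [Function.comp_apply]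
      push_cast
      ring
    rw [List.filter_cons]
    by_cases hk : k ∈ raw
    · rw [if_pos hk, List.getD_cons_zero,
        if_pos (show decide (k ∈ raw) = true from by simp [hk]),
        List.map_cons, htail, List.singleton_append]
      simp
    · rw [if_neg hk, List.getD_cons_zero,
        if_neg (show ¬ decide (k ∈ raw) = true from by simp [hk]), htail, List.nil_append]

theorem pvB_fold (raw dels : List Int) (L : List (Int × String)) (code : List String) (pos : List Int) :
    L.foldl (pvB_step raw dels) (code, pos)
      = (code ++ (L.filter (fun p => decide (¬ p.1 ∈ dels))).map (·.2),
         pos ++ pvPosK raw ((L.filter (fun p => decide (¬ p.1 ∈ dels))).map (·.1)) code.length) := by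
  induction L generalizing code pos with
  | nil => simp [pvPosK]
  | cons p L ih =>
    by_cases hd : p.1 ∈ dels
    · simp [pvB_step, hd, ih]
    · by_cases hr : p.1 ∈ raw <;> simp [pvB_step, hd, hr, ih, pvPosK]

theorem pvEnum_eq (source : List String) (s : Int) :
    PySem.List.enumerate source s
      = (List.range source.length).map (fun (k : Nat) => (s + (k : Int), source.getD k "")) := by
  induction source generalizing s with
  | nil => simp [PySem.List.enumerate_nil]
  | cons x xs ih =>
    rw [PySem.List.enumerate_cons, ih (s + 1), List.length_cons, List.range_succ_eq_map,
      List.map_cons, List.map_map]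
    simp only [Nat.cast_zero, add_zero, List.getD_cons_zero]
    congr 1
    refine List.map_congr_left (fun k _ => ?_)
    simp only [Function.comp, Prod.ext_iff, List.getD_cons_succ]
    exact ⟨by push_cast; ring, trivial⟩

-- the surviving 0-based indices for one deletion set
def pvKept (source : List String) (dels : List Int) : List Nat :=
  (List.range source.length).filter (fun (k : Nat) => decide (¬ ((k : Int) + 1) ∈ dels))

theorem pvEnum_one (source : List String) :
    PySem.List.enumerate source 1
      = (List.range source.length).map (fun (k : Nat) => ((k : Int) + 1, source.getD k "")) := by
  rw [pvEnum_eq]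
  exact List.map_congr_left (fun k _ => by rw [add_comm])

theorem pvLineB (source : List String) (raw dels : List Int) :
    (PySem.List.enumerate source 1).foldl (pvB_step raw dels) ([], [])
      = ((pvKept source dels).map (fun k => source.getD k ""),
         pvPosK raw ((pvKept source dels).map (fun (k : Nat) => (k : Int) + 1)) 0) := by
  rw [pvEnum_one, pvB_fold, List.filter_map, List.map_map, List.map_map]
  simp only [Function.comp_def, List.nil_append, List.length_nil, pvKept]

theorem pvAllLines (source : List String) :
    PySem.List.pyRange 1 (PySem.List.len source + 1) 1
      = (List.range source.length).map (fun (k : Nat) => (k : Int) + 1) := by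
  have h := PySem.List.map_fst_enumerate source 1
  rw [pvEnum_one, List.map_map] at h
  simp only [PySem.List.len_eq]
  rw [add_comm (1 : Int)] at h
  rw [← h]
  exact (List.map_congr_left (fun k _ => rfl))

theorem pvLineA_new (source : List String) (raw dels : List Int) :
    pvA_newline raw (PySem.List.pyRange 1 (PySem.List.len source + 1) 1) dels
      = ((pvKept source dels).map (fun (k : Nat) => (k : Int) + 1),
         pvPosK raw ((pvKept source dels).map (fun (k : Nat) => (k : Int) + 1)) 0) := by
  rw [pvA_newline, pvAllLines]
  have hnew : ((List.range source.length).map (fun (k : Nat) => (k : Int) + 1)).foldl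
        (fun acc line => if ¬ (line ∈ dels) then acc ++ [line] else acc) []
      = (pvKept source dels).map (fun (k : Nat) => (k : Int) + 1) := by
    rw [PySem.List.foldl_append_ite_eq_filter, List.filter_map, List.nil_append, pvKept]
    rfl
  simp only [hnew]
  refine Prod.ext rfl ?_
  by_cases hflag :
      (raw.any fun a => decide (a ∈ (pvKept source dels).map (fun (k : Nat) => (k : Int) + 1))) = true
  · simp only [hflag, if_true]
    rw [PySem.List.foldl_append_ite
        (p := fun i => ((pvKept source dels).map (fun (k : Nat) => (k : Int) + 1)).getD i 0 ∈ raw)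
        (f := fun (i : Nat) => (i : Int) + 1),
      List.nil_append, pvPosK_char]
    exact List.map_congr_left (fun i _ => by push_cast; ring)
  · simp only [hflag, if_false, Bool.false_eq_true]
    rw [pvPosK_eq_nil]
    intro k hk hkraw
    rw [Bool.not_eq_true, List.any_eq_false] at hflag
    exact absurd (decide_eq_true hk) (by simpa using hflag k hkraw)

theorem pvLineA_code (source : List String) (dels : List Int) :
    ((pvKept source dels).map (fun (k : Nat) => (k : Int) + 1)).foldl
        (fun c new => c ++ [(PySem.List.pyGet? source (new - 1)).getD ""]) []
      = (pvKept source dels).map (fun k => source.getD k "") := by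
  rw [PySem.List.foldl_append_singleton_eq_map, List.nil_append, List.map_map]
  refine List.map_congr_left (fun k hk => ?_)
  have hklt : k < source.length := List.mem_range.mp (List.mem_of_mem_filter hk)
  simp only [Function.comp_apply, add_sub_cancel_right, PySem.List.pyGet?_natCast,
    Option.getD_some, List.getD_eq_getElem?_getD, List.getElem?_eq_getElem hklt]

theorem pvLineA_code_empty (source : List String) (dels : List Int) :
    (List.range source.length).foldl
        (fun c (i : Nat) => if ¬ (((i : Int) + 1) ∈ dels) then c ++ [source.getD i ""] else c) []
      = (pvKept source dels).map (fun k => source.getD k "") := by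
  rw [PySem.List.foldl_append_ite (p := fun (i : Nat) => ¬ (((i : Int) + 1) ∈ dels))
    (f := fun (i : Nat) => source.getD i ""), List.nil_append, pvKept]

theorem pvOpt_eq (l : List Int) :
    (if l.length = 0 then (none : Option (List Int)) else some l)
      = (if l.isEmpty then none else some l) := by
  cases l <;> simp

theorem pvPosK_nil_raw (ks : List Int) (c : Nat) : pvPosK [] ks c = [] :=
  pvPosK_eq_nil [] ks c (fun _ _ => List.not_mem_nil)

-- ===== VERDICT (by name: the statement is the Claim_ definition above) =====
theorem get_chiled_code_spec : Claim_equal_get_chiled_code := by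
  intro source raw_lines lines _
  unfold Spec_get_chiled_code get_chiled_code get_chiled_code_alt
  by_cases hraw : raw_lines ≠ []
  · rw [if_pos hraw]
    refine PySem.List.foldl_congr_mem lines _ _ ([], []) (fun st line _ => ?_)
    simp only [pvLineB, pvLineA_new, pvLineA_code, pvOpt_eq]
  · rw [if_neg hraw]
    simp only [ne_eq, not_not] at hraw
    subst hraw
    refine PySem.List.foldl_congr_mem lines _ _ ([], []) (fun st line _ => ?_)
    simp only [pvLineB, pvLineA_code_empty, pvPosK_nil_raw, List.isEmpty_nil, if_true]
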